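-- pv_equiv track=rewrite | github.com/vk1815918/DSA | pythonToolsLibrariesPractice/counter/counterTest.py | solution
-- ===== SOURCE A (Python) =====
-- from collections import Counter
--
-- def solution(a, b, queries):
--     af = Counter(a)
--     bf = Counter(b)
--
--     ans = []
--
--     for query in queries:
--
--         if query[0] == 0:
--             af[a[query[1]]]-=1
--             if af[a[query[1]]] == 0:
--                 del af[a[query[1]]]
--
--             a[query[1]] = query[2]
--             af[a[query[1]]]+=1
--         else:
--             count = 0
--
--             for i in af:
--                 if query[1] - i in bf:
--                     count+=af[i]*bf[query[1] - i]
--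
--             ans.append(count)
--
--     return ans
--
-- a = [3, 4]
--
-- b = [1, 2, 3]
--
-- queries = [
--     [1, 5],  # Count pairs such that a[i] + b[j] = 5
--     [0, 0, 1],  # Update a[0] = 1
--     [1, 5]  # Count pairs such that a[i] + b[j] = 5
-- ]
-- ===== SOURCE B (Python) =====
-- def solution(a, b, queries):
--     # one frequency map for b only; queries scan a directly, updates are plain assignments
--     bf = {}
--     for x in b:
--         bf[x] = bf.get(x, 0) + 1
--     ans = []
--     for q in queries:
--         if q[0] == 0:
--             a[q[1]] = q[2]
--         else:
--             t = q[1]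
--             ans.append(sum(bf.get(t - x, 0) for x in a))
--     return ans
-- ===== Notes on version B (the rewrite author's own statement) =====
-- stated objective: simpler
-- what changed: B drops A's maintained Counter over a (with its decrement/delete/increment bookkeeping) entirely: updates become plain assignments and each count query is a single scan of a summing bf.get(t - x, 0), instead of A's loop over the distinct values of a with multiplicities.
-- outside the precondition, e.g. on solution([], [3], [[-2], [3]]): A returns [0, 0], B raises IndexError
import Mathlib
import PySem

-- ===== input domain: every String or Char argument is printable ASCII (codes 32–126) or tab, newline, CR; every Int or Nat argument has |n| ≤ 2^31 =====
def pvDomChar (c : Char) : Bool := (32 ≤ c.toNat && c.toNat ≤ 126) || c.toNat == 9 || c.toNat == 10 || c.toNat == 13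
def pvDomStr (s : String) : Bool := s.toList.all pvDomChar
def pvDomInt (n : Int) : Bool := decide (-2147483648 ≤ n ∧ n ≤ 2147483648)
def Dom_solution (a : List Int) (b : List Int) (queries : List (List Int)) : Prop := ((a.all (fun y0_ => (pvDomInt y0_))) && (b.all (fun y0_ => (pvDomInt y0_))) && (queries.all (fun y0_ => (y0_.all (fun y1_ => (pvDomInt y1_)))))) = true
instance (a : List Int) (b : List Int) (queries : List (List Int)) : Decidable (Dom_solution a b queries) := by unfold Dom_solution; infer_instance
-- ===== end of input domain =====

-- B drops A's maintained Counter over `a` (simpler, not claimed faster); equivalence is about the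
-- RETURN value — both Pythons mutate `a` in place in the same way.

-- ===== PORT A =====
-- one query step of A: state (af, a, ans)
def solStepA (bf : PySem.Dict Int Int) (s : PySem.Dict Int Int × List Int × List Int)
    (q : List Int) : PySem.Dict Int Int × List Int × List Int :=
  let af := s.1; let a := s.2.1; let ans := s.2.2
  if PySem.List.pyGetD q 0 0 = 0 then
    let i := PySem.List.pyGetD q 1 0
    let old := PySem.List.pyGetD a i 0
    let af := af.modify old 0 (· - 1)
    let af := if af.getD old 0 = 0 then af.erase old else af
    let a := PySem.List.pySetD a i (PySem.List.pyGetD q 2 0)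
    let af := af.modify (PySem.List.pyGetD a i 0) 0 (· + 1)
    (af, a, ans)
  else
    let t := PySem.List.pyGetD q 1 0
    let count := af.keys.foldl
      (fun c i => if bf.contains (t - i) then c + af.getD i 0 * bf.getD (t - i) 0 else c) 0
    (af, a, ans ++ [count])

def solution (a : List Int) (b : List Int) (queries : List (List Int)) : List Int :=
  let af := PySem.Dict.counter a
  let bf := PySem.Dict.counter b
  (queries.foldl (solStepA bf) (af, a, [])).2.2

-- ===== PORT B =====
-- one query step of B: state (a, ans)
def solStepB (bf : PySem.Dict Int Int) (s : List Int × List Int) (q : List Int) :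
    List Int × List Int :=
  if PySem.List.pyGetD q 0 0 = 0 then
    (PySem.List.pySetD s.1 (PySem.List.pyGetD q 1 0) (PySem.List.pyGetD q 2 0), s.2)
  else
    let t := PySem.List.pyGetD q 1 0
    (s.1, s.2 ++ [(s.1.map (fun x => bf.getD (t - x) 0)).sum])

def solution_alt (a : List Int) (b : List Int) (queries : List (List Int)) : List Int :=
  let bf := b.foldl (fun d x => d.insert x (d.getD x 0 + 1)) PySem.Dict.empty
  (queries.foldl (solStepB bf) (a, [])).2

-- ===== PRECONDITION & SPEC =====
-- Pre_ excludes the malformed queries (an empty query, a too-short query, an update index out of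
-- range): B raises IndexError on all of them, and so does A except in one degenerate corner — a
-- too-short count query with `a` empty, where A's loop over the empty Counter never reads q[1].
def Pre_solution (a : List Int) (b : List Int) (queries : List (List Int)) : Prop :=
  ∀ q ∈ queries, 1 ≤ q.length ∧
    (if q.getD 0 0 = 0
     then 3 ≤ q.length ∧ PySem.Raise.InRange a.length (q.getD 1 0)
     else 2 ≤ q.length)
instance (a : List Int) (b : List Int) (queries : List (List Int)) : Decidable (Pre_solution a b queries) := by unfold Pre_solution; infer_instance

def pvWitness_solution : List Int × List Int × List (List Int) :=
  ([3, 4], [1, 2, 3], [[1, 5], [0, 0, 1], [1, 5]])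

def Spec_solution (a : List Int) (b : List Int) (queries : List (List Int)) (out : List Int) : Prop := out = solution_alt a b queries
instance (a : List Int) (b : List Int) (queries : List (List Int)) (out : List Int) : Decidable (Spec_solution a b queries out) := by unfold Spec_solution; infer_instance

-- ===== CLAIM (what is proved, stated in full; the proofs are below) =====
def Claim_equal_solution : Prop := ∀ (a : List Int) (b : List Int) (queries : List (List Int)), Dom_solution a b queries → Pre_solution a b queries → Spec_solution a b queries (solution a b queries)

-- ===== LEMMAS AND PROOFS =====

-- `af` represents the multiset of elements of the current list `l`
def RepCtr (af : PySem.Dict Int Int) (l : List Int) : Prop :=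
  (∀ k, af.getD k 0 = (l.count k : Int)) ∧ af.keys.Nodup ∧ (∀ k, k ∈ af.keys ↔ k ∈ l)

-- a query is well formed w.r.t. the (fixed) length of `a`
def WfQ (n : Nat) (q : List Int) : Prop :=
  1 ≤ q.length ∧
    (if q.getD 0 0 = 0
     then 3 ≤ q.length ∧ PySem.Raise.InRange n (q.getD 1 0)
     else 2 ≤ q.length)

-- facts about PySem.Dict.erase (items-filter) used by the update invariant
theorem dict_get?_erase {κ ν : Type} [BEq κ] [LawfulBEq κ] [DecidableEq κ]
    (d : PySem.Dict κ ν) (k k' : κ) :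
    (d.erase k).get? k' = if k' = k then none else d.get? k' := by
  unfold PySem.Dict.erase PySem.Dict.get?
  induction d.items with
  | nil => simp
  | cons p rest ih =>
    rw [show ∀ (L : List (κ × ν)), ({items := L} : PySem.Dict κ ν).items = L from fun _ => rfl]
    by_cases h1 : p.1 = k
    · rw [List.filter_cons_of_neg (by simp [h1])]
      rw [ih]
      by_cases h2 : k' = k
      · simp [h2]
      · rw [List.find?_cons_of_neg (l := rest) (by simp [h1]; exact fun h => h2 h.symm),
          if_neg h2]
    · rw [List.filter_cons_of_pos (by simp [h1])]
      by_cases h2 : p.1 = k'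
      · rw [List.find?_cons_of_pos (a := p) (by simp [h2]),
          List.find?_cons_of_pos (a := p) (by simp [h2]),
          if_neg (fun h => h1 (h2.trans h))]
      · rw [List.find?_cons_of_neg (a := p) (by simp [h2]),
          List.find?_cons_of_neg (a := p) (by simp [h2])]
        exact ih

theorem dict_keys_erase {κ ν : Type} [BEq κ] (d : PySem.Dict κ ν) (k : κ) :
    (d.erase k).keys = d.keys.filter (fun x => !x == k) := by
  unfold PySem.Dict.erase PySem.Dict.keys
  induction d.items with
  | nil => rfl
  | cons p rest ih => by_cases h : p.1 == k <;> simp [h, ih]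

-- the normalized index behind the pyGetD/pySetD uses at an in-range index
theorem idx_norm (l : List Int) (i v : Int) (h : PySem.Raise.InRange l.length i) :
    ∃ n : Nat, ∃ _ : n < l.length,
      PySem.List.pyGetD l i 0 = l[n] ∧ PySem.List.pySetD l i v = l.set n v ∧
      PySem.List.pyGetD (PySem.List.pySetD l i v) i 0 = v := by
  obtain ⟨h1, h2⟩ := h
  have hsome : ∃ n : Nat, PySem.List.pyIdx? l.length i = some n ∧ n < l.length := by
    by_cases hpos : 0 ≤ i
    · exact ⟨i.toNat, by unfold PySem.List.pyIdx?; rw [if_pos hpos, if_pos (by omega)], by omega⟩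
    · exact ⟨l.length - (-i).toNat,
        by unfold PySem.List.pyIdx?; rw [if_neg hpos, if_pos (by omega)], by omega⟩
  obtain ⟨n, hidx, hn⟩ := hsome
  refine ⟨n, hn, ?_, ?_, ?_⟩
  · simp [PySem.List.pyGetD, PySem.List.pyGet?, hidx, List.getElem?_eq_getElem hn]
  · simp [PySem.List.pySetD, PySem.List.pySet?, hidx]
  · have hlen : (l.set n v).length = l.length := by simp
    simp [PySem.List.pySetD, PySem.List.pySet?, PySem.List.pyGetD, PySem.List.pyGet?,
      hlen, hidx, List.getElem?_eq_getElem (hlen ▸ hn), List.getElem_set_self]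

-- A's count-query loop over the distinct values of `l` equals B's scan of `l`
theorem rep_query (af : PySem.Dict Int Int) (l : List Int) (bf : PySem.Dict Int Int)
    (hrep : RepCtr af l) (t : Int) :
    af.keys.foldl
      (fun c i => if bf.contains (t - i) then c + af.getD i 0 * bf.getD (t - i) 0 else c) 0
      = (l.map (fun x => bf.getD (t - x) 0)).sum := by
  obtain ⟨hc, hnd, hm⟩ := hrep
  have hbody : ∀ (c i : Int),
      (if bf.contains (t - i) then c + af.getD i 0 * bf.getD (t - i) 0 else c)
        = c + (l.count i : Int) * bf.getD (t - i) 0 := by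
    intro c i
    by_cases h : bf.contains (t - i)
    · simp [h, hc]
    · simp only [Bool.not_eq_true] at h
      simp [h, PySem.Dict.getD_of_not_contains _ _ h]
  calc af.keys.foldl
        (fun c i => if bf.contains (t - i) then c + af.getD i 0 * bf.getD (t - i) 0 else c) 0
      = af.keys.foldl (fun c i => c + (l.count i : Int) * bf.getD (t - i) 0) 0 :=
        PySem.List.foldl_congr_mem _ _ _ _ (fun c i _ => hbody c i)
    _ = ((af.keys.map (fun i => (l.count i : Int) * bf.getD (t - i) 0)).sum) := by
        rw [PySem.List.foldl_add]; simp
    _ = ∑ i ∈ af.keys.toFinset, (l.count i : Int) * bf.getD (t - i) 0 :=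
        (List.sum_toFinset _ hnd).symm
    _ = ∑ i ∈ l.toFinset, (l.count i : Int) * bf.getD (t - i) 0 := by
        apply Finset.sum_congr _ (fun _ _ => rfl)
        ext x; simp [List.mem_toFinset, hm]
    _ = (l.map (fun x => bf.getD (t - x) 0)).sum := by
        rw [Finset.sum_list_map_count]
        exact Finset.sum_congr rfl (fun x _ => by simp)

-- A's Counter bookkeeping at an update step preserves the representation invariant
theorem rep_update (af : PySem.Dict Int Int) (l : List Int) (hrep : RepCtr af l)
    (i v : Int) (hi : PySem.Raise.InRange l.length i) :
    RepCtr
      (let old := PySem.List.pyGetD l i 0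
       let af1 := af.modify old 0 (· - 1)
       let af2 := if af1.getD old 0 = 0 then af1.erase old else af1
       af2.modify (PySem.List.pyGetD (PySem.List.pySetD l i v) i 0) 0 (· + 1))
      (PySem.List.pySetD l i v) := by
  obtain ⟨hc, hnd, hm⟩ := hrep
  obtain ⟨n, hn, hget, hset, hgetset⟩ := idx_norm l i v hi
  rw [hset] at hgetset
  rw [hset, hgetset]
  dsimp only
  set old := PySem.List.pyGetD l i 0 with hold
  have holdmem : old ∈ l := hget ▸ List.getElem_mem hn
  have holdpos : 1 ≤ l.count old := List.count_pos_iff.2 holdmem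
  have hcount : ∀ k : Int, ((l.set n v).count k : Int)
      = (l.count k : Int) - (if old = k then 1 else 0) + (if v = k then 1 else 0) := by
    intro k
    rw [List.count_set hn, ← hget]
    by_cases h1 : old = k <;> by_cases h2 : v = k
    · rw [if_pos (by simp [h1]), if_pos (by simp [h2]), if_pos h1, if_pos h2]
      have : 1 ≤ l.count k := h1 ▸ holdpos
      omega
    · rw [if_pos (by simp [h1]), if_neg (by simp [h2]), if_pos h1, if_neg h2]
      have : 1 ≤ l.count k := h1 ▸ holdpos
      omega
    · rw [if_neg (by simp [h1]), if_pos (by simp [h2]), if_neg h1, if_pos h2]; omega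
    · rw [if_neg (by simp [h1]), if_neg (by simp [h2]), if_neg h1, if_neg h2]; omega
  have hmemset : ∀ k : Int, k ∈ l.set n v ↔ 0 < ((l.set n v).count k : Int) := by
    intro k; rw [Int.natCast_pos]; exact List.count_pos_iff.symm
  have hmeml : ∀ k : Int, k ∈ l ↔ 0 < (l.count k : Int) := by
    intro k; rw [Int.natCast_pos]; exact List.count_pos_iff.symm
  set af1 := af.modify old 0 (· - 1) with haf1
  have hc1 : ∀ k, af1.getD k 0 = if k = old then (l.count old : Int) - 1 else (l.count k : Int) := by
    intro k; rw [haf1, PySem.Dict.getD_modify]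
    split_ifs with h <;> simp [hc]
  have hk1 : ∀ k, k ∈ af1.keys ↔ k = old ∨ k ∈ l := by
    intro k
    rw [haf1, PySem.Dict.keys_modify, PySem.Dict.mem_keys_insert, hm]
  have hnd1 : af1.keys.Nodup := by
    rw [haf1, PySem.Dict.keys_modify]; exact PySem.Dict.nodup_keys_insert _ _ _ hnd
  clear_value old af1
  clear hold haf1 hget hset hgetset hc hm hi holdmem
  by_cases hz : af1.getD old 0 = 0
  · -- the multiplicity of the overwritten value drops to 0: the key is deleted
    have h1 : (l.count old : Int) = 1 := by have := hc1 old; simp [hz] at this; omega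
    have hcase : (if af1.getD old 0 = 0 then af1.erase old else af1) = af1.erase old := by
      simp [hz]
    rw [hcase]
    have hc2 : ∀ k, (af1.erase old).getD k 0 = if k = old then 0 else (l.count k : Int) := by
      intro k
      rw [PySem.Dict.getD_eq_get?_getD, dict_get?_erase]
      split_ifs with h
      · rfl
      · rw [← PySem.Dict.getD_eq_get?_getD, hc1, if_neg h]
    have hk2 : ∀ k, k ∈ (af1.erase old).keys ↔ k ≠ old ∧ k ∈ l := by
      intro k
      rw [dict_keys_erase]
      simp only [List.mem_filter, hk1, Bool.not_eq_eq_eq_not, Bool.not_true,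
        beq_eq_false_iff_ne]
      constructor
      · rintro ⟨h, hne⟩
        exact ⟨hne, h.resolve_left hne⟩
      · rintro ⟨hne, h⟩; exact ⟨Or.inr h, hne⟩
    refine ⟨?_, ?_, ?_⟩
    · intro k
      rw [PySem.Dict.getD_modify, hcount, hc2, hc2]
      split_ifs <;> subst_vars <;> omega
    · rw [PySem.Dict.keys_modify]
      apply PySem.Dict.nodup_keys_insert
      rw [dict_keys_erase]; exact hnd1.filter _
    · intro k
      rw [PySem.Dict.keys_modify, PySem.Dict.mem_keys_insert, hk2, hmemset, hcount k, hmeml]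
      split_ifs <;> subst_vars <;>
        (constructor
         · rintro (h' | ⟨hne, hpos⟩) <;> omega
         · intro hpos
           first
             | exact Or.inl rfl
             | exact Or.inr ⟨by omega, by omega⟩)
  · -- the multiplicity stays positive: the key stays
    have h2' : 2 ≤ (l.count old : Int) := by have := hc1 old; simp at this; omega
    have hcase : (if af1.getD old 0 = 0 then af1.erase old else af1) = af1 := by simp [hz]
    rw [hcase]
    refine ⟨?_, ?_, ?_⟩
    · intro k
      rw [PySem.Dict.getD_modify, hcount, hc1, hc1]
      split_ifs <;> subst_vars <;> omega
    · rw [PySem.Dict.keys_modify]; exact PySem.Dict.nodup_keys_insert _ _ _ hnd1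
    · intro k
      rw [PySem.Dict.keys_modify, PySem.Dict.mem_keys_insert, hk1, hmemset, hcount k, hmeml]
      split_ifs <;> subst_vars <;>
        (constructor
         · rintro (h' | h' | h') <;> omega
         · intro hpos
           first
             | exact Or.inl rfl
             | exact Or.inr (Or.inl rfl)
             | exact Or.inr (Or.inr (by omega)))

-- the loop invariant: A's state projects onto B's state
theorem loop_eq (bf : PySem.Dict Int Int) (qs : List (List Int)) :
    ∀ (af : PySem.Dict Int Int) (l ans : List Int), RepCtr af l →
      (∀ q ∈ qs, WfQ l.length q) →
      (qs.foldl (solStepA bf) (af, l, ans)).2 = qs.foldl (solStepB bf) (l, ans) := by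
  induction qs with
  | nil => intro af l ans _ _; rfl
  | cons q qs ih =>
    intro af l ans hrep hwf
    obtain ⟨hq1, hq2⟩ := hwf q (List.mem_cons_self ..)
    have hq0 : PySem.List.pyGetD q 0 0 = q.getD 0 0 := by
      simpa using PySem.List.pyGetD_ofNat' q 0 0
    have hq1' : PySem.List.pyGetD q 1 0 = q.getD 1 0 := by
      simpa using PySem.List.pyGetD_ofNat' q 1 0
    simp only [List.foldl_cons]
    by_cases h0 : q.getD 0 0 = 0
    · rw [if_pos h0] at hq2
      obtain ⟨hlen3, hrange⟩ := hq2
      have hstepA : solStepA bf (af, l, ans) q =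
          ((let old := PySem.List.pyGetD l (q.getD 1 0) 0
            let af1 := af.modify old 0 (· - 1)
            let af2 := if af1.getD old 0 = 0 then af1.erase old else af1
            af2.modify (PySem.List.pyGetD (PySem.List.pySetD l (q.getD 1 0) (PySem.List.pyGetD q 2 0)) (q.getD 1 0) 0) 0 (· + 1)),
           PySem.List.pySetD l (q.getD 1 0) (PySem.List.pyGetD q 2 0), ans) := by
        simp only [solStepA, hq0, hq1', if_pos h0]
      have hstepB : solStepB bf (l, ans) q =
          (PySem.List.pySetD l (q.getD 1 0) (PySem.List.pyGetD q 2 0), ans) := by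
        simp only [solStepB, hq0, hq1', if_pos h0]
      rw [hstepA, hstepB]
      have hrep' := rep_update af l ⟨hrep.1, hrep.2.1, hrep.2.2⟩ (q.getD 1 0)
        (PySem.List.pyGetD q 2 0) hrange
      obtain ⟨n, hn, _, hset, _⟩ := idx_norm l (q.getD 1 0) (PySem.List.pyGetD q 2 0) hrange
      have hlen : (PySem.List.pySetD l (q.getD 1 0) (PySem.List.pyGetD q 2 0)).length
          = l.length := by rw [hset]; simp
      exact ih _ _ _ hrep' (fun q' hq' => hlen ▸ hwf q' (List.mem_cons_of_mem _ hq'))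
    · rw [if_neg h0] at hq2
      have hstepA : solStepA bf (af, l, ans) q =
          (af, l, ans ++ [af.keys.foldl
            (fun c i => if bf.contains (q.getD 1 0 - i) then
              c + af.getD i 0 * bf.getD (q.getD 1 0 - i) 0 else c) 0]) := by
        simp only [solStepA, hq0, hq1', if_neg h0]
      have hstepB : solStepB bf (l, ans) q =
          (l, ans ++ [(l.map (fun x => bf.getD (q.getD 1 0 - x) 0)).sum]) := by
        simp only [solStepB, hq0, hq1', if_neg h0]
      rw [hstepA, hstepB, rep_query af l bf hrep (q.getD 1 0)]
      exact ih _ _ _ hrep (fun q' hq' => hwf q' (List.mem_cons_of_mem _ hq'))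

-- ===== VERDICT (by name: the statement is the Claim_ definition above) =====
theorem solution_spec : Claim_equal_solution := by
  intro a b queries _ hpre
  unfold Spec_solution solution solution_alt
  rw [PySem.Dict.foldl_insert_getD_add_one_eq_counter]
  have hrep : RepCtr (PySem.Dict.counter a) a := by
    refine ⟨fun k => PySem.Dict.getD_counter a k, PySem.Dict.nodup_keys_counter a, fun k => ?_⟩
    rw [PySem.Dict.keys_counter, PySem.Set.mem_ofList]
  have h := loop_eq (PySem.Dict.counter b) queries (PySem.Dict.counter a) a [] hrep hpre
  simpa using congrArg Prod.snd h
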